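-- pv_equiv track=rewrite | github.com/zabaglione/c-language-tutorial | scripts/extract_code_examples.py | clean_code_block
-- ===== SOURCE A (Python) =====
-- def clean_code_block(code):
--     """Clean up code block for compilation"""
--     # Remove extra comments at the end
--     lines = code.split('\n')
--     cleaned_lines = []
--     in_main = False
--
--     for line in lines:
--         # Skip empty lines at the beginning
--         if not cleaned_lines and not line.strip():
--             continue
--
--         # Track if we're in main function
--         if 'int main(' in line:
--             in_main = True
--
--         cleaned_lines.append(line)
--
--         # Stop after main function closes (if we find it)
--         if in_main and line.strip() == '}':
--             break
--
--     return '\n'.join(cleaned_lines)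
-- ===== SOURCE B (Python) =====
-- def _drop_while(p, xs):
--     i = 0
--     while i < len(xs) and p(xs[i]):
--         i += 1
--     return xs[i:]
--
--
-- def _span(p, xs):
--     i = 0
--     while i < len(xs) and p(xs[i]):
--         i += 1
--     return xs[:i], xs[i:]
--
--
-- def clean_code_block(code):
--     """Clean up code block for compilation (boundary/slice formulation)."""
--     lines = code.split('\n')
--     tail = _drop_while(lambda l: not l.strip(), lines)
--     pre, rest = _span(lambda l: 'int main(' not in l, tail)
--     body, after = _span(lambda l: l.strip() != '}', rest)
--     if after:
--         kept = pre + body + [after[0]]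
--     else:
--         kept = tail
--     return '\n'.join(kept)
-- ===== Notes on version B (the rewrite author's own statement) =====
-- stated objective: alternative
-- what changed: Replaces A's single accumulate-with-flags loop (cleaned_lines list, in_main flag, break) by a boundary computation: drop leading blank lines, span to the 'int main(' line, span to the closing '}' line, and join the resulting slices.
import Mathlib
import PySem

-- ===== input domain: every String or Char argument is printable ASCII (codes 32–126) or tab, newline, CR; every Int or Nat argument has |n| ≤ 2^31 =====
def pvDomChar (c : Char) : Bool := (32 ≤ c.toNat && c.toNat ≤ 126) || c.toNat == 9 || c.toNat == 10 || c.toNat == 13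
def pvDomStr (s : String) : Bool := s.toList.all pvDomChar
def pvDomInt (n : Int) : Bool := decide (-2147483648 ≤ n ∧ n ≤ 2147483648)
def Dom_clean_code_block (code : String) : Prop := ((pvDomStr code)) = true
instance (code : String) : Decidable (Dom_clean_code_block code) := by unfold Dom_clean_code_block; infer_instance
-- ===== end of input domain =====

-- B replaces A's accumulate-with-flags loop by boundary spans (drop blanks, span to 'int main(',
-- span to the closing '}') and joins the slices; objective: alternative decomposition, same cost.

-- ===== PORT A =====
-- A's single loop: skip leading blanks while nothing accumulated, append, set the in_main
-- flag on an 'int main(' line, and break after an in-main line stripping to '}'.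
def aLoop (lines cleaned : List (List Char)) (inMain : Bool) : List (List Char) :=
  match lines with
  | [] => cleaned
  | line :: rest =>
    if cleaned.isEmpty && (PySem.Chars.strip line).isEmpty then
      aLoop rest cleaned inMain
    else
      let inMain' := if PySem.Chars.isIn "int main(".toList line then true else inMain
      let cleaned' := cleaned ++ [line]
      if inMain' && (PySem.Chars.strip line == ['}']) then cleaned'
      else aLoop rest cleaned' inMain'

def clean_code_block (code : String) : String :=
  String.ofList (PySem.Chars.join ['\n']
    (aLoop (PySem.Chars.splitOn code.toList ['\n']) [] false))

-- ===== PORT B =====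
def clean_code_block_alt (code : String) : String :=
  let lines := PySem.Chars.splitOn code.toList ['\n']
  let tail := lines.dropWhile (fun l => (PySem.Chars.strip l).isEmpty)
  let pr := tail.span (fun l => !(PySem.Chars.isIn "int main(".toList l))
  let br := pr.2.span (fun l => !(PySem.Chars.strip l == ['}']))
  let kept := match br.2 with
    | [] => tail
    | a :: _ => pr.1 ++ br.1 ++ [a]
  String.ofList (PySem.Chars.join ['\n'] kept)

-- ===== PRECONDITION & SPEC =====
def Spec_clean_code_block (code : String) (out : String) : Prop := out = clean_code_block_alt code
instance (code : String) (out : String) : Decidable (Spec_clean_code_block code out) := by unfold Spec_clean_code_block; infer_instance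

-- ===== CLAIM (what is proved, stated in full; the proofs are below) =====
def Claim_equal_clean_code_block : Prop := ∀ (code : String), Dom_clean_code_block code → Spec_clean_code_block code (clean_code_block code)

-- ===== LEMMAS AND PROOFS =====

-- accumulator-free residue of A's loop, once cleaned_lines is nonempty
def pvF (xs : List (List Char)) (im : Bool) : List (List Char) :=
  match xs with
  | [] => []
  | l :: rest =>
    let im' := if PySem.Chars.isIn "int main(".toList l then true else im
    if im' && (PySem.Chars.strip l == ['}']) then [l] else l :: pvF rest im'

theorem aLoop_acc (xs : List (List Char)) : ∀ (c : List (List Char)) (im : Bool), c ≠ [] →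
    aLoop xs c im = c ++ pvF xs im := by
  induction xs with
  | nil => intro c im _; simp [aLoop, pvF]
  | cons l rest ih =>
    intro c im hc
    simp only [aLoop, pvF]
    rw [if_neg (by simp [hc])]
    split_ifs <;>
      first
        | rfl
        | (rw [ih (c ++ [l]) _ (by simp)]; simp)

theorem aLoop_start (xs : List (List Char))
    (h : ∀ l rest, xs = l :: rest → (PySem.Chars.strip l).isEmpty = false) :
    aLoop xs [] false = pvF xs false := by
  cases xs with
  | nil => simp [aLoop, pvF]
  | cons l rest =>
    simp only [aLoop, pvF]
    rw [if_neg (by simp [h l rest rfl])]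
    simp only [List.nil_append]
    split_ifs <;>
      first
        | rfl
        | (rw [aLoop_acc rest [l] _ (by simp)]; simp)

theorem aLoop_skip (xs : List (List Char)) :
    aLoop xs [] false = aLoop (xs.dropWhile (fun l => (PySem.Chars.strip l).isEmpty)) [] false := by
  induction xs with
  | nil => rfl
  | cons l rest ih =>
    by_cases hb : (PySem.Chars.strip l).isEmpty = true
    · rw [List.dropWhile_cons_of_pos (by simpa using hb), ← ih]
      simp [aLoop, hb]
    · rw [List.dropWhile_cons_of_neg (by simpa using hb)]

theorem pvF_true (xs : List (List Char)) :
    pvF xs true = xs.takeWhile (fun l => !(PySem.Chars.strip l == ['}'])) ++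
      (xs.dropWhile (fun l => !(PySem.Chars.strip l == ['}']))).take 1 := by
  induction xs with
  | nil => rfl
  | cons l rest ih =>
    by_cases hq : (PySem.Chars.strip l == ['}']) = true
    · simp [pvF, hq, List.takeWhile_cons, List.dropWhile_cons]
    · simp only [Bool.not_eq_true] at hq
      simp [pvF, hq, List.takeWhile_cons, List.dropWhile_cons, ih]

theorem pvF_false (xs : List (List Char)) :
    pvF xs false = xs.takeWhile (fun l => !(PySem.Chars.isIn "int main(".toList l)) ++
      pvF (xs.dropWhile (fun l => !(PySem.Chars.isIn "int main(".toList l))) true := by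
  induction xs with
  | nil => rfl
  | cons l rest ih =>
    by_cases hp : PySem.Chars.isIn "int main(".toList l = true
    · rw [show ("int main(".toList) = ['i','n','t',' ','m','a','i','n','('] from rfl] at hp
      rw [List.takeWhile_cons_of_neg (by simp [hp]),
        List.dropWhile_cons_of_neg (by simp [hp])]
      simp [pvF, hp]
    · simp only [Bool.not_eq_true] at hp
      rw [show ("int main(".toList) = ['i','n','t',' ','m','a','i','n','('] from rfl] at hp
      rw [List.takeWhile_cons_of_pos (by simp [hp]),
        List.dropWhile_cons_of_pos (by simp [hp])]
      simp [pvF, hp, ih]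

theorem kept_eq (tail : List (List Char)) :
    pvF tail false =
      (let pr := tail.span (fun l => !(PySem.Chars.isIn "int main(".toList l))
       let br := pr.2.span (fun l => !(PySem.Chars.strip l == ['}']))
       match br.2 with
       | [] => tail
       | a :: _ => pr.1 ++ br.1 ++ [a]) := by
  simp only [List.span_eq_takeWhile_dropWhile]
  rw [pvF_false, pvF_true]
  cases hd : (tail.dropWhile (fun l => !(PySem.Chars.isIn "int main(".toList l))).dropWhile
      (fun l => !(PySem.Chars.strip l == ['}'])) with
  | nil =>
    have h1 : (tail.dropWhile (fun l => !(PySem.Chars.isIn "int main(".toList l))).takeWhile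
        (fun l => !(PySem.Chars.strip l == ['}'])) =
        tail.dropWhile (fun l => !(PySem.Chars.isIn "int main(".toList l)) := by
      conv_rhs => rw [← List.takeWhile_append_dropWhile
        (p := fun l => !(PySem.Chars.strip l == ['}']))
        (l := tail.dropWhile (fun l => !(PySem.Chars.isIn "int main(".toList l)))]
      rw [hd]; simp
    rw [show ("int main(".toList) = ['i','n','t',' ','m','a','i','n','('] from rfl] at h1
    simp [hd, h1, List.takeWhile_append_dropWhile]
  | cons a as => simp [hd]

-- ===== VERDICT (by name: the statement is the Claim_ definition above) =====
theorem clean_code_block_spec : Claim_equal_clean_code_block := by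
  intro code _
  unfold Spec_clean_code_block clean_code_block clean_code_block_alt
  rw [aLoop_skip, aLoop_start _ (by
    intro l rest h
    have h2 := List.head?_dropWhile_not (fun l => (PySem.Chars.strip l).isEmpty)
      (PySem.Chars.splitOn code.toList ['\n'])
    rw [h] at h2
    simpa using h2), kept_eq]
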